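-- pv_equiv track=rewrite | github.com/matluz1/lorekit | src/lorekit/rules.py | _group_by_prefix
-- ===== SOURCE A (Python) =====
-- def _group_by_prefix(names: dict | list, min_group: int = 2) -> list[tuple[str, list[str]]]:
--     """Group variable names by detected prefix for readable display."""
--     keys = sorted(names if isinstance(names, list) else names.keys())
--
--     groups: dict[str, list[str]] = {}
--     for key in keys:
--         if "_" in key:
--             prefix = key[: key.index("_")]
--         else:
--             prefix = ""
--         groups.setdefault(prefix, []).append(key)
--
--     result: list[tuple[str, list[str]]] = []
--     ungrouped: list[str] = []
--     for prefix in sorted(groups):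
--         members = groups[prefix]
--         if prefix and len(members) >= min_group:
--             result.append((f"{prefix}_*", members))
--         else:
--             ungrouped.extend(members)
--
--     if ungrouped:
--         result.append(("other", ungrouped))
--
--     return result
-- ===== SOURCE B (Python) =====
-- def _group_by_prefix(names: dict | list, min_group: int = 2) -> list[tuple[str, list[str]]]:
--     """Group variable names by detected prefix for readable display (dict-free rewrite)."""
--     keys = sorted(names if isinstance(names, list) else names.keys())
--
--     def pref(k: str) -> str:
--         i = k.find("_")
--         return k[:i] if i >= 0 else ""
--
--     def members(p: str) -> list[str]:
--         return [k for k in keys if pref(k) == p]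
--
--     prefixes = sorted({pref(k) for k in keys})
--     big = [p for p in prefixes if p and len(members(p)) >= min_group]
--     result = [(p + "_*", members(p)) for p in big]
--     ungrouped = [k for p in prefixes if p not in big for k in members(p)]
--     return result + [("other", ungrouped)] if ungrouped else result
-- ===== Notes on version B (the rewrite author's own statement) =====
-- stated objective: alternative
-- what changed: Replaces A's one-pass dict-of-lists grouping with a dict-free decomposition: compute the sorted set of distinct prefixes, then rebuild each group by filtering the sorted keys per prefix, assembling grouped/ungrouped via comprehensions instead of a stateful accumulator loop.
import Mathlib
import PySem

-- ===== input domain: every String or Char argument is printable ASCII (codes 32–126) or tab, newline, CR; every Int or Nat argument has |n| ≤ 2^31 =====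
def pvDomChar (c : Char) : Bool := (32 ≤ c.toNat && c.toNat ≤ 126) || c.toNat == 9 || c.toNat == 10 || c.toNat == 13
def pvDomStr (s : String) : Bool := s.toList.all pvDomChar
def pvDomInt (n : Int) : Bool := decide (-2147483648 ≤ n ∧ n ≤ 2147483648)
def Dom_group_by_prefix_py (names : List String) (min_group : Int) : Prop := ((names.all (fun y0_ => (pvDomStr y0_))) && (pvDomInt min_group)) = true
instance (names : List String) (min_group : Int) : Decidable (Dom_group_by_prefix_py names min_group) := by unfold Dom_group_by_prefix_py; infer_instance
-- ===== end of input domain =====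

-- ===== PORT A =====
-- B is a dict-free rewrite of A (distinct-prefix set + per-prefix scans) — objective: alternative decomposition.

-- A's prefix computation: key[:key.index("_")] if "_" in key else "" (index is guarded by the
-- membership test, so PySem.Str.find computes the same position there — exact).
def pvPrefA (key : String) : String :=
  if PySem.Str.isIn "_" key then PySem.Str.slice key none (some (PySem.Str.find key "_")) else ""

def group_by_prefix_py (names : List String) (min_group : Int) : List (String × List String) :=
  -- names is a list under the type convention, so `names if isinstance(names, list) else names.keys()` is names
  let keys := PySem.List.sorted names (fun s => s) false
  let groups : PySem.Dict String (List String) :=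
    keys.foldl (fun d key => d.modify (pvPrefA key) [] (fun l => l ++ [key])) PySem.Dict.empty
  let out :=
    (PySem.List.sorted groups.keys (fun s => s) false).foldl
      (fun (acc : List (String × List String) × List String) p =>
        -- members = groups[prefix] (inlined)
        if p ≠ "" ∧ min_group ≤ ((groups.getD p []).length : Int) then
          (acc.1 ++ [(p ++ "_*", groups.getD p [])], acc.2)
        else
          (acc.1, acc.2 ++ groups.getD p []))
      ([], [])
  if out.2 ≠ [] then out.1 ++ [("other", out.2)] else out.1

-- ===== PORT B =====
-- B's prefix helper: i = k.find("_"); k[:i] if i >= 0 else ""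
def pvPrefB (k : String) : String :=
  let i := PySem.Str.find k "_"
  if 0 ≤ i then PySem.Str.slice k none (some i) else ""

def group_by_prefix_py_alt (names : List String) (min_group : Int) : List (String × List String) :=
  let keys := PySem.List.sorted names (fun s => s) false
  let mem := fun (p : String) => keys.filter (fun k => pvPrefB k == p)
  let prefixes := PySem.List.sorted (PySem.Set.ofList (keys.map pvPrefB)) (fun s => s) false
  let big := prefixes.filter (fun p => decide (p ≠ "" ∧ min_group ≤ ((mem p).length : Int)))
  let result := big.map (fun p => (p ++ "_*", mem p))
  let ungrouped := (prefixes.filter (fun p => decide (p ∉ big))).flatMap mem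
  if ungrouped ≠ [] then result ++ [("other", ungrouped)] else result

-- ===== PRECONDITION & SPEC =====

def Spec_group_by_prefix_py (names : List String) (min_group : Int) (out : List (String × List String)) : Prop := out = group_by_prefix_py_alt names min_group
instance (names : List String) (min_group : Int) (out : List (String × List String)) : Decidable (Spec_group_by_prefix_py names min_group out) := by unfold Spec_group_by_prefix_py; infer_instance

-- ===== CLAIM (what is proved, stated in full; the proofs are below) =====
def Claim_equal_group_by_prefix_py : Prop := ∀ (names : List String) (min_group : Int), Dom_group_by_prefix_py names min_group → Spec_group_by_prefix_py names min_group (group_by_prefix_py names min_group)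

-- ===== LEMMAS AND PROOFS =====

-- The two prefix helpers compute the same string.
theorem pvPref_eq (k : String) : pvPrefA k = pvPrefB k := by
  have h1 := PySem.Chars.find_ne_neg_one_iff k.toList "_".toList
  have h2 := PySem.Chars.find_nonneg_iff k.toList "_".toList
  unfold pvPrefA pvPrefB
  simp only [PySem.Str.isIn, PySem.Chars.isIn, PySem.Str.find]
  by_cases h : 0 ≤ PySem.Chars.find k.toList "_".toList
  · have hb : (PySem.Chars.find k.toList "_".toList != -1) = true := by
      simp only [bne_iff_ne, ne_eq]
      exact h1.mpr (h2.mp h)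
    rw [if_pos hb, if_pos h]
  · have hb : ¬ ((PySem.Chars.find k.toList "_".toList != -1) = true) := by
      simp only [bne_iff_ne, ne_eq]
      exact fun hc => h (h2.mpr (h1.mp hc))
    rw [if_neg hb, if_neg h]

-- A's grouping dict, characterised: lookup is a filter of the (sorted) keys.
theorem pvGroupsGetD (f : String → String) (keys : List String) (c : String) :
    ((keys.foldl (fun d key => d.modify (f key) [] (fun l => l ++ [key]))
        (PySem.Dict.empty : PySem.Dict String (List String))).getD c [])
      = keys.filter (fun k => f k == c) := by
  have h := PySem.Dict.getD_foldl_modify_append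
    (keys.map (fun k => (f k, k))) (PySem.Dict.empty : PySem.Dict String (List String)) c
  rw [List.foldl_map] at h
  simpa [List.filter_map, Function.comp_def, List.map_map] using h

-- A's grouping dict, characterised: its key list is the ordered set of prefixes.
theorem pvGroupsKeys (f : String → String) (keys : List String) :
    ((keys.foldl (fun d key => d.modify (f key) [] (fun l => l ++ [key]))
        (PySem.Dict.empty : PySem.Dict String (List String))).keys)
      = PySem.Set.ofList (keys.map f) := by
  have h := PySem.Dict.keys_foldl_modify_key keys f ([] : List String)
    (fun _ key => fun l => l ++ [key]) (PySem.Dict.empty : PySem.Dict String (List String))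
  simpa [PySem.Set.update, PySem.Set.ofList, PySem.Set.empty,
    PySem.Dict.empty, PySem.Dict.keys] using h

-- A's accumulator loop, split into its two components (groups kept / keys dropped).
theorem pvFoldSplit (mg : Int) (mem : String → List String) :
    ∀ (P : List String) (r : List (String × List String)) (u : List String),
      P.foldl (fun (acc : List (String × List String) × List String) p =>
          if p ≠ "" ∧ mg ≤ ((mem p).length : Int) then (acc.1 ++ [(p ++ "_*", mem p)], acc.2)
          else (acc.1, acc.2 ++ mem p)) (r, u)
      = (r ++ (P.filter (fun p => decide (p ≠ "" ∧ mg ≤ ((mem p).length : Int)))).map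
            (fun p => (p ++ "_*", mem p)),
         u ++ (P.filter (fun p => !decide (p ≠ "" ∧ mg ≤ ((mem p).length : Int)))).flatMap mem)
  | [], r, u => by simp
  | p :: P, r, u => by
    rw [List.foldl_cons]
    by_cases h : p ≠ "" ∧ mg ≤ ((mem p).length : Int)
    · rw [if_pos h, pvFoldSplit mg mem P]
      simp [h.1, h.2, List.append_assoc]
    · rw [if_neg h, pvFoldSplit mg mem P]
      rcases not_and_or.mp h with h1 | h2
      · have h1' : p = "" := not_not.mp h1
        subst h1'
        simp [List.append_assoc]
      · simp [h2, List.append_assoc]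

-- "p not in big" along the prefix list is just the negated group condition.
theorem pvNotMemBig (P : List String) (c : String → Bool) :
    P.filter (fun p => decide (p ∉ P.filter c)) = P.filter (fun p => !c p) := by
  apply List.filter_congr
  intro p hp
  by_cases h : c p = true <;> simp [List.mem_filter, hp, h]

-- ===== VERDICT (by name: the statement is the Claim_ definition above) =====
theorem group_by_prefix_py_spec : Claim_equal_group_by_prefix_py := by
  intro names mg _hdom
  show group_by_prefix_py names mg = group_by_prefix_py_alt names mg
  unfold group_by_prefix_py group_by_prefix_py_alt
  simp only [pvPref_eq, pvGroupsGetD, pvGroupsKeys, pvFoldSplit, pvNotMemBig, List.nil_append]
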